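-- pv_equiv track=rewrite | github.com/kls028/matura-inf | stare matury rozszerzenie/programowanie/maj 2009 rozsz/para_slow.py | najkrotsze_slowo
-- ===== SOURCE A (Python) =====
-- def najkrotsze_slowo(para):
--     a = para[0]
--     b = para[1]
--     if b in a:
--         return a
--     else:
--         dl=len(b)
--         slowo_min = a+b
--         for i in range(dl):
--             if b[i:] == a[:len(b[i:])]:
--                 if len( b[:i]+a)<len(slowo_min):
--                     slowo_min =b[:i]+a
--         for i in range(dl):
--             if b[:i]== a[len(a)-len(b[:i]):]:
--                 if len(a+b[i:])<len(slowo_min):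
--                     slowo_min = a+b[i:]
--         return slowo_min
-- ===== SOURCE B (Python) =====
-- def najkrotsze_slowo(para):
--     # Single descending scan over the overlap size with early return,
--     # instead of A's two ascending full passes with a running minimum.
--     a = para[0]
--     b = para[1]
--     if b in a:
--         return a
--     la, lb = len(a), len(b)
--     for ov in range(min(la, lb), 0, -1):
--         if b[lb - ov:] == a[:ov]:
--             return b[:lb - ov] + a
--         if ov < lb and a[la - ov:] == b[:ov]:
--             return a + b[ov:]
--     return a + b
-- ===== Notes on version B (the rewrite author's own statement) =====
-- stated objective: alternative
-- what changed: Replaces A's two ascending full passes (each testing every overlap and keeping a running shortest string) by one descending scan over the overlap size that returns at the first match, checking both overlap directions per step; the running-minimum accumulator disappears.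
import Mathlib
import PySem

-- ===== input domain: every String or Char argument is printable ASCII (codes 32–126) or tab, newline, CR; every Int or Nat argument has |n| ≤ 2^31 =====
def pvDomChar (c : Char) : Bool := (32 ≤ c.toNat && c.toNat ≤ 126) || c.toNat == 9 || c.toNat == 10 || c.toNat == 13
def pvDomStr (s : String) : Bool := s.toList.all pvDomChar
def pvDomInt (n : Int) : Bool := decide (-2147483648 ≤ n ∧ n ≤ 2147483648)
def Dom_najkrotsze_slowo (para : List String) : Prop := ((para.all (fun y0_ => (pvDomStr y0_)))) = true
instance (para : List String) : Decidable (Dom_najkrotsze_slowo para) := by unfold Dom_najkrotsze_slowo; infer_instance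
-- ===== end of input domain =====

-- B replaces A's two ascending minimum-tracking passes by one descending
-- early-return scan over the overlap size (objective: alternative).

-- ===== PORT A =====
-- literal transliteration of A (strings handled as their code-point lists via PySem.Chars)
def najkrotsze_slowo (para : List String) : String :=
  let a := (PySem.List.pyGetD para 0 "").toList
  let b := (PySem.List.pyGetD para 1 "").toList
  if PySem.Chars.isIn b a then String.ofList a
  else
    let dl : Int := PySem.Chars.len b
    let slowo_min := a ++ b
    let slowo_min := (PySem.List.pyRange 0 dl 1).foldl (fun sm i =>
      if PySem.Chars.slice b (some i) none
           = PySem.Chars.slice a none (some (PySem.Chars.len (PySem.Chars.slice b (some i) none))) then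
        if PySem.Chars.len (PySem.Chars.slice b none (some i) ++ a) < PySem.Chars.len sm then
          PySem.Chars.slice b none (some i) ++ a
        else sm
      else sm) slowo_min
    let slowo_min := (PySem.List.pyRange 0 dl 1).foldl (fun sm i =>
      if PySem.Chars.slice b none (some i)
           = PySem.Chars.slice a (some (PySem.Chars.len a - PySem.Chars.len (PySem.Chars.slice b none (some i)))) none then
        if PySem.Chars.len (a ++ PySem.Chars.slice b (some i) none) < PySem.Chars.len sm then
          a ++ PySem.Chars.slice b (some i) none
        else sm
      else sm) slowo_min
    String.ofList slowo_min

-- ===== PORT B =====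
-- the 'for ov in range(min(la,lb), 0, -1)' early-return loop of Source B
def pvMergeLoop (a b : List Char) : Nat → List Char
  | 0 => a ++ b
  | ov + 1 =>
      if b.drop (b.length - (ov + 1)) = a.take (ov + 1) then
        b.take (b.length - (ov + 1)) ++ a
      else if ov + 1 < b.length ∧ a.drop (a.length - (ov + 1)) = b.take (ov + 1) then
        a ++ b.drop (ov + 1)
      else pvMergeLoop a b ov

def najkrotsze_slowo_alt (para : List String) : String :=
  let a := (PySem.List.pyGetD para 0 "").toList
  let b := (PySem.List.pyGetD para 1 "").toList
  if PySem.Chars.isIn b a then String.ofList a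
  else String.ofList (pvMergeLoop a b (min a.length b.length))

-- ===== PRECONDITION & SPEC =====
-- Pre_ excludes only lists with fewer than two elements, on which A raises IndexError.
def Pre_najkrotsze_slowo (para : List String) : Prop := 2 ≤ para.length
instance (para : List String) : Decidable (Pre_najkrotsze_slowo para) := by
  unfold Pre_najkrotsze_slowo; infer_instance
def pvWitness_najkrotsze_slowo : List String := ["abab", "bab"]

def Spec_najkrotsze_slowo (para : List String) (out : String) : Prop := out = najkrotsze_slowo_alt para
instance (para : List String) (out : String) : Decidable (Spec_najkrotsze_slowo para out) := by
  unfold Spec_najkrotsze_slowo; infer_instance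

-- ===== CLAIM (what is proved, stated in full; the proofs are below) =====
def Claim_equal_najkrotsze_slowo : Prop := ∀ (para : List String), Dom_najkrotsze_slowo para → Pre_najkrotsze_slowo para → Spec_najkrotsze_slowo para (najkrotsze_slowo para)

-- ===== LEMMAS AND PROOFS =====

-- greatest overlap of each kind: pvO1 = largest ov with "last ov chars of b = first ov chars of a",
-- pvO2 = largest ov ≤ len b - 1 with "last ov chars of a = first ov chars of b" (both 0 if none)
def pvO1 (a b : List Char) : Nat :=
  Nat.findGreatest (fun ov => b.drop (b.length - ov) = a.take ov) b.length
def pvO2 (a b : List Char) : Nat :=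
  Nat.findGreatest (fun ov => a.drop (a.length - ov) = b.take ov) (b.length - 1)

-- the shortest merge both programs compute
def pvBest (a b : List Char) : List Char :=
  if pvO1 a b < pvO2 a b then a ++ b.drop (pvO2 a b)
  else if 1 ≤ pvO1 a b then b.take (b.length - pvO1 a b) ++ a
  else a ++ b

-- A's loop bodies, on Nat indices
def pvStep1 (a b sm : List Char) (i : Nat) : List Char :=
  if b.drop i = a.take (b.length - i) then
    (if i + a.length < sm.length then b.take i ++ a else sm) else sm
def pvStep2 (a b sm : List Char) (i : Nat) : List Char :=
  if a.drop (a.length - i) = b.take i then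
    (if a.length + (b.length - i) < sm.length then a ++ b.drop i else sm) else sm

-- A's state after the first loop
def pvSm1 (a b : List Char) : List Char :=
  if 1 ≤ pvO1 a b then b.take (b.length - pvO1 a b) ++ a else a ++ b

-- greatest second-kind overlap above pvO1 among indices < n
def pvK (a b : List Char) (n : Nat) : Nat :=
  Nat.findGreatest (fun i => (a.drop (a.length - i) = b.take i) ∧ pvO1 a b < i ∧ i < n) b.length

lemma pvFG_pos {P : Nat → Prop} [DecidablePred P] {n : Nat}
    (h : 0 < Nat.findGreatest P n) : P (Nat.findGreatest P n) :=
  ((Nat.findGreatest_eq_iff).mp rfl).2.1 h.ne'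

lemma pvO1_spec (a b : List Char) (h : 0 < pvO1 a b) :
    b.drop (b.length - pvO1 a b) = a.take (pvO1 a b) := pvFG_pos h
lemma pvO2_spec (a b : List Char) (h : 0 < pvO2 a b) :
    a.drop (a.length - pvO2 a b) = b.take (pvO2 a b) := pvFG_pos h
lemma pvK_spec (a b : List Char) (n : Nat) (h : 0 < pvK a b n) :
    (a.drop (a.length - pvK a b n) = b.take (pvK a b n))
      ∧ pvO1 a b < pvK a b n ∧ pvK a b n < n := pvFG_pos h

lemma pvO1_le_b (a b : List Char) : pvO1 a b ≤ b.length := Nat.findGreatest_le _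
lemma pvO2_le_b (a b : List Char) : pvO2 a b ≤ b.length - 1 := Nat.findGreatest_le _
lemma pvK_le_b (a b : List Char) (n : Nat) : pvK a b n ≤ b.length := Nat.findGreatest_le _

lemma pvO1_ge (a b : List Char) (ov : Nat) (hb : ov ≤ b.length)
    (h : b.drop (b.length - ov) = a.take ov) : ov ≤ pvO1 a b := Nat.le_findGreatest hb h
lemma pvO2_ge (a b : List Char) (ov : Nat) (hb : ov ≤ b.length - 1)
    (h : a.drop (a.length - ov) = b.take ov) : ov ≤ pvO2 a b := Nat.le_findGreatest hb h
lemma pvK_ge (a b : List Char) (n i : Nat) (hb : i ≤ b.length)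
    (h1 : a.drop (a.length - i) = b.take i) (h2 : pvO1 a b < i) (h3 : i < n) :
    i ≤ pvK a b n := Nat.le_findGreatest hb ⟨h1, h2, h3⟩

lemma pvO1_max (a b : List Char) (ov : Nat) (h : pvO1 a b < ov) (hb : ov ≤ b.length) :
    ¬ (b.drop (b.length - ov) = a.take ov) := Nat.findGreatest_is_greatest h hb

lemma pvP_le (a b : List Char) (ov : Nat) (h : b.drop (b.length - ov) = a.take ov)
    (hov : ov ≤ b.length) : ov ≤ a.length := by
  have := congrArg List.length h
  simp [List.length_drop, List.length_take] at this
  omega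

lemma pvQ_le (a b : List Char) (ov : Nat) (h : a.drop (a.length - ov) = b.take ov)
    (hov : ov ≤ b.length) : ov ≤ a.length := by
  have := congrArg List.length h
  simp [List.length_drop, List.length_take] at this
  omega

lemma pvO1_le_a (a b : List Char) : pvO1 a b ≤ a.length := by
  rcases Nat.eq_zero_or_pos (pvO1 a b) with h | h
  · omega
  · exact pvP_le a b _ (pvO1_spec a b h) (pvO1_le_b a b)

lemma pvO2_le_a (a b : List Char) : pvO2 a b ≤ a.length := by
  rcases Nat.eq_zero_or_pos (pvO2 a b) with h | h
  · omega
  · exact pvQ_le a b _ (pvO2_spec a b h) (le_trans (pvO2_le_b a b) (Nat.sub_le _ _))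

-- B's loop computes pvBest
lemma pvMergeLoop_eq (a b : List Char) (n : Nat)
    (h1 : pvO1 a b ≤ n) (h2 : pvO2 a b ≤ n) (h3 : n ≤ min a.length b.length) :
    pvMergeLoop a b n = pvBest a b := by
  induction n with
  | zero =>
      have hO1 : pvO1 a b = 0 := by omega
      have hO2 : pvO2 a b = 0 := by omega
      simp [pvMergeLoop, pvBest, hO1, hO2]
  | succ n ih =>
      rw [pvMergeLoop]
      by_cases hP : b.drop (b.length - (n + 1)) = a.take (n + 1)
      · have hO1 : pvO1 a b = n + 1 :=
          le_antisymm h1 (pvO1_ge a b (n + 1) (by omega) hP)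
        have hnlt : ¬ pvO1 a b < pvO2 a b := by omega
        rw [if_pos hP]
        unfold pvBest
        rw [if_neg hnlt, if_pos (by omega), hO1]
      · by_cases hQ : n + 1 < b.length ∧ a.drop (a.length - (n + 1)) = b.take (n + 1)
        · have hO2 : pvO2 a b = n + 1 :=
            le_antisymm h2 (pvO2_ge a b (n + 1) (by omega) hQ.2)
          have hO1ne : pvO1 a b ≠ n + 1 := by
            intro he
            have hp := pvO1_spec a b (by omega)
            rw [he] at hp
            exact hP hp
          have hlt : pvO1 a b < pvO2 a b := by omega
          rw [if_neg hP, if_pos hQ]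
          unfold pvBest
          rw [if_pos hlt, hO2]
        · have hO1 : pvO1 a b ≤ n := by
            rcases Nat.lt_or_ge (pvO1 a b) (n + 1) with h | h
            · omega
            · have he : pvO1 a b = n + 1 := le_antisymm h1 h
              have hp := pvO1_spec a b (by omega)
              rw [he] at hp
              exact absurd hp hP
          have hO2 : pvO2 a b ≤ n := by
            rcases Nat.lt_or_ge (pvO2 a b) (n + 1) with h | h
            · omega
            · have he : pvO2 a b = n + 1 := le_antisymm h2 h
              have hq := pvO2_spec a b (by omega)
              rw [he] at hq
              have hb := pvO2_le_b a b
              exact absurd ⟨by omega, hq⟩ hQ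
          rw [if_neg hP, if_neg hQ]
          exact ih hO1 hO2 (by omega)

-- A's first loop: bridge from the Int/slice body to pvStep1
lemma pvBridge1 (a b init : List Char) :
    List.foldl (fun sm i =>
      if PySem.Chars.slice b (some i) none
           = PySem.Chars.slice a none (some (PySem.Chars.len (PySem.Chars.slice b (some i) none))) then
        if PySem.Chars.len (PySem.Chars.slice b none (some i) ++ a) < PySem.Chars.len sm then
          PySem.Chars.slice b none (some i) ++ a
        else sm
      else sm) init (PySem.List.pyRange 0 (PySem.Chars.len b) 1)
    = List.foldl (pvStep1 a b) init (List.range b.length) := by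
  rw [PySem.Chars.len_eq b, PySem.List.pyRange_one]
  have h0 : (((b.length : Int)) - 0).toNat = b.length := by simp
  rw [h0, List.foldl_map]
  apply PySem.List.foldl_congr_mem
  intro acc k hk
  have hk' : k < b.length := List.mem_range.mp hk
  simp only [zero_add, PySem.Chars.slice_eq_listSlice, PySem.List.slice_from_natCast,
    PySem.Chars.len_eq, List.length_drop, PySem.List.slice_to_natCast, pvStep1,
    List.length_append, List.length_take, Nat.cast_add]
  have hmin : min k b.length = k := by omega
  rw [hmin]
  norm_cast

-- A's second loop: bridge from the Int/slice body to pvStep2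
lemma pvBridge2 (a b init : List Char) :
    List.foldl (fun sm i =>
      if PySem.Chars.slice b none (some i)
           = PySem.Chars.slice a (some (PySem.Chars.len a - PySem.Chars.len (PySem.Chars.slice b none (some i)))) none then
        if PySem.Chars.len (a ++ PySem.Chars.slice b (some i) none) < PySem.Chars.len sm then
          a ++ PySem.Chars.slice b (some i) none
        else sm
      else sm) init (PySem.List.pyRange 0 (PySem.Chars.len b) 1)
    = List.foldl (pvStep2 a b) init (List.range b.length) := by
  rw [PySem.Chars.len_eq b, PySem.List.pyRange_one]
  have h0 : (((b.length : Int)) - 0).toNat = b.length := by simp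
  rw [h0, List.foldl_map]
  apply PySem.List.foldl_congr_mem
  intro acc k hk
  have hk' : k < b.length := List.mem_range.mp hk
  simp only [zero_add, PySem.Chars.slice_eq_listSlice, PySem.List.slice_to_natCast,
    PySem.Chars.len_eq, List.length_take, PySem.List.slice_from_natCast]
  have hmin : min k b.length = k := by omega
  rw [hmin]
  have hcond : (b.take k = PySem.List.slice a (some ((a.length : Int) - (k : Int))) none)
      ↔ (a.drop (a.length - k) = b.take k) := by
    by_cases hka : k ≤ a.length
    · have hc : ((a.length : Int) - (k : Int)) = ((a.length - k : Nat) : Int) := by omega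
      rw [hc, PySem.List.slice_from_natCast]
      exact eq_comm
    · constructor
      · intro h
        have hl := congrArg List.length h
        rw [PySem.List.slice_some_none] at hl
        simp [List.length_take, List.length_drop] at hl
        omega
      · intro h
        have hl := congrArg List.length h
        simp [List.length_take, List.length_drop] at hl
        omega
  simp only [pvStep2, List.length_append, List.length_drop, Nat.cast_add]
  rw [if_congr hcond rfl rfl]
  norm_cast

-- first loop closed form
lemma pvLoop1 (a b : List Char) (n : Nat) (hn : n ≤ b.length) :
    List.foldl (pvStep1 a b) (a ++ b) (List.range n)
    = (if b.length - pvO1 a b < n ∧ 1 ≤ pvO1 a b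
       then b.take (b.length - pvO1 a b) ++ a else a ++ b) := by
  have hO1b : pvO1 a b ≤ b.length := pvO1_le_b a b
  induction n with
  | zero => simp
  | succ n ih =>
      rw [List.range_succ, List.foldl_append, ih (by omega)]
      simp only [List.foldl_cons, List.foldl_nil]
      by_cases hc : b.length - pvO1 a b < n ∧ 1 ≤ pvO1 a b
      · have hcs : b.length - pvO1 a b < n + 1 ∧ 1 ≤ pvO1 a b := ⟨by omega, hc.2⟩
        rw [if_pos hc, if_pos hcs]
        unfold pvStep1
        have hlen : (b.take (b.length - pvO1 a b) ++ a).length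
            = (b.length - pvO1 a b) + a.length := by
          simp [List.length_append, List.length_take]
        rw [hlen]
        split_ifs with h1 h2 <;> first | rfl | omega
      · by_cases hc2 : b.length - pvO1 a b = n ∧ 1 ≤ pvO1 a b
        · rw [if_neg hc]
          have hP : b.drop n = a.take (b.length - n) := by
            have h1 : b.length - n = pvO1 a b := by omega
            have h2 := pvO1_spec a b (by omega)
            rw [hc2.1] at h2
            rw [h1, h2]
          have hcs : b.length - pvO1 a b < n + 1 ∧ 1 ≤ pvO1 a b := ⟨by omega, hc2.2⟩
          rw [if_pos hcs]
          unfold pvStep1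
          rw [if_pos hP]
          have hlt : n + a.length < (a ++ b).length := by
            simp [List.length_append]; omega
          rw [if_pos hlt, ← hc2.1]
        · have hcs : ¬ (b.length - pvO1 a b < n + 1 ∧ 1 ≤ pvO1 a b) := by
            intro h; exact hc2 ⟨by omega, h.2⟩
          rw [if_neg hc, if_neg hcs]
          have hnP : ¬ (b.drop n = a.take (b.length - n)) := by
            have hmax := pvO1_max a b (b.length - n) (by omega) (by omega)
            have he : b.length - (b.length - n) = n := by omega
            rw [he] at hmax
            exact hmax
          unfold pvStep1
          rw [if_neg hnP]

lemma pvSm1_length (a b : List Char) :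
    (pvSm1 a b).length = a.length + b.length - pvO1 a b := by
  have hO1b : pvO1 a b ≤ b.length := pvO1_le_b a b
  unfold pvSm1
  split_ifs with h
  · simp [List.length_append, List.length_take]; omega
  · simp [List.length_append]; omega

-- second loop closed form
lemma pvLoop2 (a b : List Char) (n : Nat) (hn : n ≤ b.length) :
    List.foldl (pvStep2 a b) (pvSm1 a b) (List.range n)
    = (if 0 < pvK a b n then a ++ b.drop (pvK a b n) else pvSm1 a b) := by
  have hO1b : pvO1 a b ≤ b.length := pvO1_le_b a b
  induction n with
  | zero =>
      have h0 : ¬ 0 < pvK a b 0 := by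
        intro h; exact absurd (pvK_spec a b 0 h).2.2 (by omega)
      simp [h0]
  | succ n ih =>
      rw [List.range_succ, List.foldl_append, ih (by omega)]
      simp only [List.foldl_cons, List.foldl_nil]
      by_cases hQn : (a.drop (a.length - n) = b.take n) ∧ pvO1 a b < n
      · have hKlow : n ≤ pvK a b (n + 1) :=
          pvK_ge a b (n + 1) n (by omega) hQn.1 hQn.2 (by omega)
        have hKhigh : pvK a b (n + 1) ≤ n := by
          by_contra h
          exact absurd (pvK_spec a b (n + 1) (by omega)).2.2 (by omega)
        have hK1 : pvK a b (n + 1) = n := le_antisymm hKhigh hKlow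
        by_cases hK : 0 < pvK a b n
        · have hs := pvK_spec a b n hK
          rw [if_pos hK]
          unfold pvStep2
          rw [if_pos hQn.1]
          have hlen : (a ++ b.drop (pvK a b n)).length
              = a.length + (b.length - pvK a b n) := by
            simp [List.length_append, List.length_drop]
          rw [hlen, if_pos (by omega), hK1]
          rw [if_pos (by omega : 0 < n)]
        · rw [if_neg hK]
          unfold pvStep2
          rw [if_pos hQn.1, pvSm1_length, if_pos (by omega), hK1]
          rw [if_pos (by omega : 0 < n)]
      · have hK1 : pvK a b (n + 1) = pvK a b n := by
          apply le_antisymm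
          · by_cases h : 0 < pvK a b (n + 1)
            · have hs := pvK_spec a b (n + 1) h
              have hne : pvK a b (n + 1) ≠ n := by
                intro he
                rw [he] at hs
                exact hQn ⟨hs.1, hs.2.1⟩
              exact pvK_ge a b n _ (pvK_le_b a b (n + 1)) hs.1 hs.2.1 (by omega)
            · omega
          · by_cases h : 0 < pvK a b n
            · have hs := pvK_spec a b n h
              exact pvK_ge a b (n + 1) _ (pvK_le_b a b n) hs.1 hs.2.1 (by omega)
            · omega
        rw [hK1]
        by_cases hq : a.drop (a.length - n) = b.take n
        · have hno : ¬ pvO1 a b < n := fun o => hQn ⟨hq, o⟩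
          by_cases hK : 0 < pvK a b n
          · exfalso
            have hs := pvK_spec a b n hK
            omega
          · rw [if_neg hK]
            unfold pvStep2
            rw [if_pos hq, pvSm1_length, if_neg (by omega)]
        · by_cases hK : 0 < pvK a b n
          · rw [if_pos hK]
            unfold pvStep2
            rw [if_neg hq]
          · rw [if_neg hK]
            unfold pvStep2
            rw [if_neg hq]

lemma pvK_final (a b : List Char) :
    pvK a b b.length = (if pvO1 a b < pvO2 a b then pvO2 a b else 0) := by
  have hO2b : pvO2 a b ≤ b.length - 1 := pvO2_le_b a b
  by_cases hlt : pvO1 a b < pvO2 a b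
  · have hge : pvO2 a b ≤ pvK a b b.length :=
      pvK_ge a b b.length _ (by omega) (pvO2_spec a b (by omega)) hlt (by omega)
    have hle : pvK a b b.length ≤ pvO2 a b := by
      by_cases h : 0 < pvK a b b.length
      · have hs := pvK_spec a b b.length h
        exact pvO2_ge a b _ (by omega) hs.1
      · omega
    rw [if_pos hlt]; omega
  · rw [if_neg hlt]
    by_contra h
    have hs := pvK_spec a b b.length (by omega)
    have : pvK a b b.length ≤ pvO2 a b := pvO2_ge a b _ (by omega) hs.1
    omega

-- both cores produce pvBest
lemma pvMain (a b : List Char) :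
    List.foldl (pvStep2 a b)
      (List.foldl (pvStep1 a b) (a ++ b) (List.range b.length)) (List.range b.length)
    = pvMergeLoop a b (min a.length b.length) := by
  have hO1b : pvO1 a b ≤ b.length := pvO1_le_b a b
  have hO2b : pvO2 a b ≤ b.length - 1 := pvO2_le_b a b
  have hsm1 : List.foldl (pvStep1 a b) (a ++ b) (List.range b.length) = pvSm1 a b := by
    rw [pvLoop1 a b b.length le_rfl]
    unfold pvSm1
    by_cases h : 1 ≤ pvO1 a b
    · rw [if_pos ⟨by omega, h⟩, if_pos h]
    · rw [if_neg (by omega), if_neg h]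
  rw [hsm1, pvLoop2 a b b.length le_rfl, pvK_final,
    pvMergeLoop_eq a b (min a.length b.length)
      (le_min (pvO1_le_a a b) hO1b) (le_min (pvO2_le_a a b) (by omega)) le_rfl]
  unfold pvBest pvSm1
  by_cases hlt : pvO1 a b < pvO2 a b
  · rw [if_pos hlt, if_pos (by omega : (0:Nat) < pvO2 a b), if_pos hlt]
  · rw [if_neg hlt, if_neg (by omega : ¬ (0:Nat) < 0), if_neg hlt]

-- ===== VERDICT (by name: the statement is the Claim_ definition above) =====
theorem najkrotsze_slowo_spec : Claim_equal_najkrotsze_slowo := by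
  unfold Claim_equal_najkrotsze_slowo Spec_najkrotsze_slowo
  intro para _ _
  unfold najkrotsze_slowo najkrotsze_slowo_alt
  by_cases h : PySem.Chars.isIn ((PySem.List.pyGetD para 1 "").toList) ((PySem.List.pyGetD para 0 "").toList)
  · simp only [h, if_true]
  · simp only [h, if_false, Bool.false_eq_true]
    rw [pvBridge1, pvBridge2, pvMain]
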